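-- pv_equiv track=rewrite | github.com/clemsciences/menota-training | training.py | reduce_tags
-- ===== SOURCE A (Python) =====
-- def reduce_tags(pos_tag: str) -> str:
--     first_part = pos_tag.strip().split(" ")[0]
--     if "|" in first_part:
--         return reduce_tags(first_part.split("|")[0])
--     if first_part.startswith("x"):
--         return first_part[1:]
--     elif "00000" == first_part:
--         return ""
--     else:
--         return pos_tag
-- ===== SOURCE B (Python) =====
-- def reduce_tags(pos_tag: str) -> str:
--     core = pos_tag.strip().split(" ")[0]
--     if "|" in core:
--         kept = core.split("|")[0]
--         key = kept.strip()
--     else: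
--         kept = pos_tag
--         key = core
--     if key.startswith("x"):
--         return key[1:]
--     if key == "00000":
--         return ""
--     return kept
-- ===== Notes on version B (the rewrite author's own statement) =====
-- stated objective: simpler
-- what changed: Replaces A's self-recursion (at most one level deep) by a single straight-line pass that keeps the pipe-stripped token and the stripped key it is classified by.
import Mathlib
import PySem

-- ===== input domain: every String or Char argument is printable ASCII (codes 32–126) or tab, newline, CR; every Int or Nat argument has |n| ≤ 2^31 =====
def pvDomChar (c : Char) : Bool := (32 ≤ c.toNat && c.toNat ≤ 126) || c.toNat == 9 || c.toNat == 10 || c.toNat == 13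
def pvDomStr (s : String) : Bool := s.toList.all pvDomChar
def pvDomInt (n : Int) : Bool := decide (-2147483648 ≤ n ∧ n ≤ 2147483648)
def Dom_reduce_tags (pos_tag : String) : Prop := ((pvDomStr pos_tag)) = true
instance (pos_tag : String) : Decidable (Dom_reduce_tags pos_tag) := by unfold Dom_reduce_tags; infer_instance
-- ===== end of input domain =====

-- B replaces A's self-recursion (which is at most one level deep) by a single straight-line
-- pass that keeps the pipe-stripped token and its stripped key; objective: simpler.

-- ===== PORT A =====
-- The lemmas before the port are cited by its decreasing_by (termination of A's recursion).

-- head? of splitOn.go keeps the oldest accumulated piece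
theorem pvGoHeadApp (c : Char) (a : List Char) : ∀ (fuel : Nat) (l cur : List Char) (acc : List (List Char)),
    (PySem.Chars.splitOn.go [c] fuel l cur (acc ++ [a])).head? = some a := by
  intro fuel
  induction fuel with
  | zero => intro l cur acc; rw [PySem.Chars.splitOn.go.eq_def]; simp
  | succ n ih =>
    intro l cur acc
    cases l with
    | nil => rw [PySem.Chars.splitOn.go.eq_def]; simp
    | cons ch rest =>
      rw [PySem.Chars.splitOn.go.eq_def]
      simp only []
      split
      · have := ih (List.drop [c].length (ch :: rest)) [] (cur.reverse :: acc)
        simpa using this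
      · exact ih rest (ch :: cur) acc

-- head? of splitOn.go from an empty accumulator is the first separator-free chunk
theorem pvGoHeadNil (c : Char) : ∀ (fuel : Nat) (l cur : List Char), l.length ≤ fuel →
    (PySem.Chars.splitOn.go [c] fuel l cur []).head? = some (cur.reverse ++ l.takeWhile (· ≠ c)) := by
  intro fuel
  induction fuel with
  | zero =>
    intro l cur h
    have hl : l = [] := List.eq_nil_of_length_eq_zero (Nat.le_zero.mp h)
    subst hl; rw [PySem.Chars.splitOn.go.eq_def]; simp
  | succ n ih =>
    intro l cur h
    cases l with
    | nil => rw [PySem.Chars.splitOn.go.eq_def]; simp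
    | cons ch rest =>
      rw [PySem.Chars.splitOn.go.eq_def]
      simp only []
      by_cases hpre : [c].isPrefixOf (ch :: rest) = true
      · rw [if_pos hpre]
        have hch : c = ch := by simpa [List.isPrefixOf] using hpre
        subst hch
        have := pvGoHeadApp c cur.reverse n (List.drop [c].length (c :: rest)) [] []
        simpa using this
      · rw [if_neg hpre]
        have hch : ¬ (ch = c) := by
          intro h'; subst h'; simp [List.isPrefixOf] at hpre
        rw [ih rest (ch :: cur) (by simpa using Nat.le_of_succ_le_succ h)]
        simp [hch]

-- s.split(c)[0] = the longest c-free prefix of s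
theorem pvSplitOnSingleHead (c : Char) (s : List Char) :
    (PySem.Chars.splitOn s [c]).headD [] = s.takeWhile (· ≠ c) := by
  have := pvGoHeadNil c (s.length + 1) s [] (by omega)
  simp [PySem.Chars.splitOn, List.headD_eq_head?_getD, this]

-- Str-level form of pvSplitOnSingleHead, for a single-character separator
theorem pvSplitHead (s sep : String) (c : Char) (hsep : sep.toList = [c]) :
    (((PySem.Str.split? s sep).getD []).headD "") = String.ofList (s.toList.takeWhile (· ≠ c)) := by
  have h := pvSplitOnSingleHead c s.toList
  simp only [List.headD_eq_head?_getD] at h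
  simp [PySem.Str.split?, PySem.Chars.split?, hsep, h]

theorem pvMemStrip {a : Char} {l : List Char} (h : a ∈ PySem.Chars.strip l) : a ∈ l := by
  have h1 : (PySem.Chars.strip l).Sublist (PySem.Chars.lstrip l) := by
    simpa [PySem.Chars.strip, PySem.Chars.rstrip] using
      (List.dropWhile_sublist (l := (PySem.Chars.lstrip l).reverse) PySem.Chars.isspace).reverse
  have h2 : (PySem.Chars.lstrip l).Sublist l := List.dropWhile_sublist _
  exact h2.mem (h1.mem h)

-- '|' occurs in pos_tag whenever it occurs in pos_tag.strip().split(" ")[0]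
theorem pvPipeMem {pos_tag : String}
    (h : PySem.Str.isIn "|" (((PySem.Str.split? (PySem.Str.strip pos_tag) " ").getD []).headD "") = true) :
    '|' ∈ pos_tag.toList := by
  rw [pvSplitHead (PySem.Str.strip pos_tag) " " ' ' (by decide)] at h
  have hinf := (PySem.Str.isIn_iff_infix _ _).mp h
  have hmem : '|' ∈ (PySem.Str.strip pos_tag).toList.takeWhile (· ≠ ' ') := by
    have : ('|' : Char) ∈ ("|" : String).toList := by decide
    simpa using hinf.sublist.mem this
  have hmem2 : '|' ∈ (PySem.Str.strip pos_tag).toList :=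
    (List.takeWhile_sublist _).mem hmem
  rw [PySem.Str.toList_strip] at hmem2
  exact pvMemStrip hmem2

-- the pipe-stripped token contains no '|'
theorem pvPipeFree (s : String) :
    '|' ∉ (((PySem.Str.split? s "|").getD []).headD "").toList := by
  rw [pvSplitHead s "|" '|' (by decide)]
  intro hmem
  have := List.mem_takeWhile_imp (by simpa using hmem)
  simp at this

def reduce_tags (pos_tag : String) : String :=
  let first_part := ((PySem.Str.split? (PySem.Str.strip pos_tag) " ").getD []).headD ""
  if h : PySem.Str.isIn "|" first_part = true then
    reduce_tags (((PySem.Str.split? first_part "|").getD []).headD "")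
  else if PySem.Str.startswith first_part "x" then
    PySem.Str.slice first_part (some 1) none
  else if "00000" = first_part then ""
  else pos_tag
termination_by (if '|' ∈ pos_tag.toList then 1 else 0)
decreasing_by
  have h1 : '|' ∈ pos_tag.toList := pvPipeMem h
  have h2 := pvPipeFree (((PySem.Str.split? (PySem.Str.strip pos_tag) " ").getD []).headD "")
  simp only [List.headD_eq_head?_getD] at h2
  simp [h1, h2]

-- ===== PORT B =====
def reduce_tags_alt (pos_tag : String) : String :=
  let core := ((PySem.Str.split? (PySem.Str.strip pos_tag) " ").getD []).headD ""
  let kk : String × String :=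
    if PySem.Str.isIn "|" core then
      let kept := ((PySem.Str.split? core "|").getD []).headD ""
      (kept, PySem.Str.strip kept)
    else (pos_tag, core)
  if PySem.Str.startswith kk.2 "x" then PySem.Str.slice kk.2 (some 1) none
  else if kk.2 = "00000" then ""
  else kk.1

-- ===== PRECONDITION & SPEC =====
def Spec_reduce_tags (pos_tag : String) (out : String) : Prop := out = reduce_tags_alt pos_tag
instance (pos_tag : String) (out : String) : Decidable (Spec_reduce_tags pos_tag out) := by unfold Spec_reduce_tags; infer_instance

-- ===== CLAIM (what is proved, stated in full; the proofs are below) =====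
def Claim_equal_reduce_tags : Prop := ∀ (pos_tag : String), Dom_reduce_tags pos_tag → Spec_reduce_tags pos_tag (reduce_tags pos_tag)

-- ===== LEMMAS AND PROOFS =====

-- the first token contains no space
theorem pvCoreSpaceFree (pos_tag : String) :
    ' ' ∉ (((PySem.Str.split? (PySem.Str.strip pos_tag) " ").getD []).headD "").toList := by
  rw [pvSplitHead (PySem.Str.strip pos_tag) " " ' ' (by decide)]
  intro hmem
  have := List.mem_takeWhile_imp (by simpa using hmem)
  simp at this

-- splitting a space-free string on " " returns the string itself
theorem pvSplitOfSpaceFree (s : String) (h : ' ' ∉ s.toList) :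
    (((PySem.Str.split? s " ").getD []).headD "") = String.ofList s.toList := by
  rw [pvSplitHead s " " ' ' (by decide)]
  congr 1
  exact List.takeWhile_eq_self_iff.mpr (fun x hx => by
    simp only [decide_eq_true_eq]
    intro hc; exact h (hc ▸ hx))

theorem pvIsInFalse (s : String) (h : '|' ∉ s.toList) :
    PySem.Str.isIn "|" s = false := by
  rw [PySem.Str.isIn_eq, PySem.Chars.isIn_eq_false_iff]
  intro hinf
  exact h (hinf.sublist.mem (by decide))

-- A on a pipe-free, space-free argument (the recursive call's argument)
theorem pvAltPipe (pos_tag : String)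
    (hp : PySem.Str.isIn "|" (((PySem.Str.split? (PySem.Str.strip pos_tag) " ").getD []).headD "") = true) :
    reduce_tags_alt pos_tag =
      (if PySem.Str.startswith (PySem.Str.strip (((PySem.Str.split? (((PySem.Str.split? (PySem.Str.strip pos_tag) " ").getD []).headD "") "|").getD []).headD "")) "x" then
        PySem.Str.slice (PySem.Str.strip (((PySem.Str.split? (((PySem.Str.split? (PySem.Str.strip pos_tag) " ").getD []).headD "") "|").getD []).headD "")) (some 1) none
      else if PySem.Str.strip (((PySem.Str.split? (((PySem.Str.split? (PySem.Str.strip pos_tag) " ").getD []).headD "") "|").getD []).headD "") = "00000" then ""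
      else ((PySem.Str.split? (((PySem.Str.split? (PySem.Str.strip pos_tag) " ").getD []).headD "") "|").getD []).headD "") := by
  unfold reduce_tags_alt
  simp only []
  rw [if_pos hp]

theorem pvAltNoPipe (pos_tag : String)
    (hp : ¬ PySem.Str.isIn "|" (((PySem.Str.split? (PySem.Str.strip pos_tag) " ").getD []).headD "") = true) :
    reduce_tags_alt pos_tag =
      (if PySem.Str.startswith (((PySem.Str.split? (PySem.Str.strip pos_tag) " ").getD []).headD "") "x" then
        PySem.Str.slice (((PySem.Str.split? (PySem.Str.strip pos_tag) " ").getD []).headD "") (some 1) none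
      else if (((PySem.Str.split? (PySem.Str.strip pos_tag) " ").getD []).headD "") = "00000" then ""
      else pos_tag) := by
  unfold reduce_tags_alt
  simp only []
  rw [if_neg hp]

theorem pvAPipe (pos_tag : String)
    (hp : PySem.Str.isIn "|" (((PySem.Str.split? (PySem.Str.strip pos_tag) " ").getD []).headD "") = true) :
    reduce_tags pos_tag =
      reduce_tags (((PySem.Str.split? (((PySem.Str.split? (PySem.Str.strip pos_tag) " ").getD []).headD "") "|").getD []).headD "") := by
  conv_lhs => unfold reduce_tags
  rw [dif_pos hp]

theorem pvANoPipe (pos_tag : String)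
    (hp : ¬ PySem.Str.isIn "|" (((PySem.Str.split? (PySem.Str.strip pos_tag) " ").getD []).headD "") = true) :
    reduce_tags pos_tag =
      (if PySem.Str.startswith (((PySem.Str.split? (PySem.Str.strip pos_tag) " ").getD []).headD "") "x" then
        PySem.Str.slice (((PySem.Str.split? (PySem.Str.strip pos_tag) " ").getD []).headD "") (some 1) none
      else if "00000" = (((PySem.Str.split? (PySem.Str.strip pos_tag) " ").getD []).headD "") then ""
      else pos_tag) := by
  unfold reduce_tags
  rw [dif_neg hp]

theorem pvKeptNoSpace (pos_tag : String) :
    ' ' ∉ (((PySem.Str.split? (((PySem.Str.split? (PySem.Str.strip pos_tag) " ").getD []).headD "") "|").getD []).headD "").toList := by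
  rw [pvSplitHead (((PySem.Str.split? (PySem.Str.strip pos_tag) " ").getD []).headD "") "|" '|' (by decide)]
  intro hmem
  exact pvCoreSpaceFree pos_tag ((List.takeWhile_sublist _).mem (by simpa using hmem))

theorem pvKeptCase (kept : String) (hpipe : '|' ∉ kept.toList) (hsp : ' ' ∉ kept.toList) :
    reduce_tags kept =
      (if PySem.Str.startswith (PySem.Str.strip kept) "x" then
        PySem.Str.slice (PySem.Str.strip kept) (some 1) none
      else if PySem.Str.strip kept = "00000" then ""
      else kept) := by
  have hspStrip : ' ' ∉ (PySem.Str.strip kept).toList := by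
    rw [PySem.Str.toList_strip]; intro hmem; exact hsp (pvMemStrip hmem)
  have hfp : (((PySem.Str.split? (PySem.Str.strip kept) " ").getD []).headD "")
      = PySem.Str.strip kept := by
    rw [pvSplitOfSpaceFree _ hspStrip]
    exact String.toList_inj.mp (by simp)
  have hpipeStrip : '|' ∉ (PySem.Str.strip kept).toList := by
    rw [PySem.Str.toList_strip]; intro hmem; exact hpipe (pvMemStrip hmem)
  have hp2 : ¬ PySem.Str.isIn "|" (((PySem.Str.split? (PySem.Str.strip kept) " ").getD []).headD "") = true := by
    rw [hfp, pvIsInFalse _ hpipeStrip]; simp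
  rw [pvANoPipe kept hp2, hfp]
  by_cases hx : PySem.Str.startswith (PySem.Str.strip kept) "x" = true
  · rw [if_pos hx, if_pos hx]
  · rw [if_neg hx, if_neg hx]
    by_cases h0 : PySem.Str.strip kept = "00000"
    · rw [if_pos (h0.symm), if_pos h0]
    · rw [if_neg (fun he => h0 he.symm), if_neg h0]

-- ===== VERDICT (by name: the statement is the Claim_ definition above) =====
theorem reduce_tags_spec : Claim_equal_reduce_tags := by
  intro pos_tag _
  unfold Spec_reduce_tags
  by_cases hp : PySem.Str.isIn "|" (((PySem.Str.split? (PySem.Str.strip pos_tag) " ").getD []).headD "") = true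
  · rw [pvAPipe pos_tag hp,
        pvKeptCase _ (pvPipeFree (((PySem.Str.split? (PySem.Str.strip pos_tag) " ").getD []).headD ""))
          (pvKeptNoSpace pos_tag),
        pvAltPipe pos_tag hp]
  · rw [pvANoPipe pos_tag hp, pvAltNoPipe pos_tag hp]
    by_cases hx : PySem.Str.startswith (((PySem.Str.split? (PySem.Str.strip pos_tag) " ").getD []).headD "") "x" = true
    · rw [if_pos hx, if_pos hx]
    · rw [if_neg hx, if_neg hx]
      by_cases h0 : (((PySem.Str.split? (PySem.Str.strip pos_tag) " ").getD []).headD "") = "00000"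
      · rw [if_pos (h0.symm), if_pos h0]
      · rw [if_neg (fun he => h0 he.symm), if_neg h0]
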